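-- pv_equiv track=rewrite | github.com/Pandoxo/Matura-Informatyka | Matura2022 czerwiec/zd2.py | koduj
-- ===== SOURCE A (Python) =====
-- def koduj(n):
--     if n == 1:
--         return ""
--     else:
--         k = n // 2
--         if k % 2 == 0:
--             return koduj(k) + "A"
--         else:
--             return "B" + koduj(k)
-- ===== SOURCE B (Python) =====
-- def koduj(n):
--     marks = []
--     while n != 1:
--         k = n // 2
--         marks.append('A' if k % 2 == 0 else 'B')
--         n = k
--     s = ""
--     for m in reversed(marks):
--         s = s + 'A' if m == 'A' else 'B' + s
--     return s
-- ===== Notes on version B (the rewrite author's own statement) =====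
-- stated objective: alternative
-- what changed: Replaces the two-sided recursion by an explicit while-loop that records one mark per halving step, then folds the marks innermost-first (append 'A' / prepend 'B') to rebuild the string iteratively.
import Mathlib
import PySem

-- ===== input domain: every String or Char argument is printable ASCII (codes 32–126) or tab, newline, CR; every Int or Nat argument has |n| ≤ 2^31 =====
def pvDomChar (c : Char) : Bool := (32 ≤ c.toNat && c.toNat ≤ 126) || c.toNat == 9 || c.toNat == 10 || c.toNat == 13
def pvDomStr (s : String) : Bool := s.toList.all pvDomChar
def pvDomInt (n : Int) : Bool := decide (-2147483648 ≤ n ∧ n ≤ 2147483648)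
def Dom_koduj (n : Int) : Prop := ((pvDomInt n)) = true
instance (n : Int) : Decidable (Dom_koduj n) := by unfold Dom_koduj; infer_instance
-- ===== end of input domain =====

-- B replaces the two-sided recursion by a while-loop recording one mark per halving
-- step, then an innermost-first fold (append 'A' / prepend 'B'); objective: alternative decomposition.

-- ===== PORT A =====
-- fuel = n.toNat bounds the recursion depth; for every n ≥ 1 (the inputs where the
-- Python returns) the fuel is never exhausted, so this computes exactly A's value.
def kodujFuel : Nat → Int → String
  | 0, _ => ""
  | fuel + 1, n =>
    if n == 1 then ""
    else
      let k := PySem.Int.floordiv n 2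
      if PySem.Int.mod k 2 == 0 then kodujFuel fuel k ++ "A"
      else "B" ++ kodujFuel fuel k

def koduj (n : Int) : String := kodujFuel n.toNat n

-- ===== PORT B =====
-- the while-loop of Source B, same fuel bound (sufficient for every n ≥ 1)
def marksFuel : Nat → Int → List Char
  | 0, _ => []
  | fuel + 1, n =>
    if n == 1 then []
    else
      let k := PySem.Int.floordiv n 2
      (if PySem.Int.mod k 2 == 0 then 'A' else 'B') :: marksFuel fuel k

def koduj_alt (n : Int) : String :=
  let marks := marksFuel n.toNat n
  marks.reverse.foldl (fun s m => if m == 'A' then s ++ "A" else "B" ++ s) ""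

-- ===== PRECONDITION & SPEC =====
-- Pre_ excludes n ≤ 0, where Python A hits RecursionError (and Python B loops forever).
def Pre_koduj (n : Int) : Prop := 1 ≤ n
instance (n : Int) : Decidable (Pre_koduj n) := by unfold Pre_koduj; infer_instance
def pvWitness_koduj : Int := (6)

def Spec_koduj (n : Int) (out : String) : Prop := out = koduj_alt n
instance (n : Int) (out : String) : Decidable (Spec_koduj n out) := by unfold Spec_koduj; infer_instance

-- ===== CLAIM (what is proved, stated in full; the proofs are below) =====
def Claim_equal_koduj : Prop := ∀ (n : Int), Dom_koduj n → Pre_koduj n → Spec_koduj n (koduj n)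

-- ===== LEMMAS AND PROOFS =====

-- the key invariant: for the SAME fuel, A's recursion equals B's fold over the recorded marks
theorem kodujFuel_eq_fold (fuel : Nat) : ∀ (n : Int),
    kodujFuel fuel n =
      (marksFuel fuel n).reverse.foldl (fun s m => if m == 'A' then s ++ "A" else "B" ++ s) "" := by
  induction fuel with
  | zero => intro n; rfl
  | succ fuel ih =>
    intro n
    by_cases h : n = 1
    · simp [kodujFuel, marksFuel, h]
    · simp only [kodujFuel, marksFuel, beq_iff_eq, h, if_false]
      rw [List.reverse_cons, List.foldl_append, ih]
      by_cases hk : PySem.Int.mod (PySem.Int.floordiv n 2) 2 = 0 <;> simp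

theorem koduj_spec : Claim_equal_koduj := by
  intro n _ _
  unfold Spec_koduj koduj koduj_alt
  exact kodujFuel_eq_fold n.toNat n
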